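-- pv_equiv track=rewrite | github.com/GeorgePowhattan/Daily-Coding-Problem | 7 Witness of The Tall People.py | witnesses
-- ===== SOURCE A (Python) =====
-- def witnesses(heights):
--     witnesses = []
--     witnesses.append(heights[-1])
--     for people in reversed(heights):
--         if people > witnesses[-1]:
--             witnesses.append(people)
--         else:
--             pass
--     return len(witnesses)
-- ===== SOURCE B (Python) =====
-- def witnesses(heights):
--     # A person is a witness iff strictly taller than everyone to their right.
--     count = 0
--     for i, h in enumerate(heights):
--         if all(h > x for x in heights[i+1:]):
--             count += 1
--     return count
-- ===== Notes on version B (the rewrite author's own statement) =====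
-- stated objective: alternative
-- what changed: Replaces A's right-to-left running-max stack (seeded with the last element) by a direct definitional count: for each index, check that the element is strictly greater than every element to its right.
import Mathlib
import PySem

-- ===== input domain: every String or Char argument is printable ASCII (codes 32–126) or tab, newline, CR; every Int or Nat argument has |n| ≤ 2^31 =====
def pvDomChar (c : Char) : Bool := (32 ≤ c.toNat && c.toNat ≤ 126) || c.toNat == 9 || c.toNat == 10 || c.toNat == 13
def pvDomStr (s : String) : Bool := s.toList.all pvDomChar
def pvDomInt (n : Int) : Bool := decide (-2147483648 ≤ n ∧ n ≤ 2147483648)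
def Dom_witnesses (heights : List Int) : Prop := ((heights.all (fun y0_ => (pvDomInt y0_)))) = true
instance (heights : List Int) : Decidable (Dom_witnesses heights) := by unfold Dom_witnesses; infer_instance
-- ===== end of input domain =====

-- B replaces A's right-to-left running-max stack with the definitional per-index
-- suffix scan ("taller than everyone to the right"); alternative algorithm, not faster.


-- ===== PORT A =====
-- Python's list with append-at-end and read of witnesses[-1] is represented with the
-- newest element at the HEAD (cons / headI); only the last-appended element and the
-- length are ever read, so this is the same state step for step.
def witnesses (heights : List Int) : Int :=
  match PySem.List.pyGet? heights (-1) with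
  | none => 0  -- IndexError indexing the last element; excluded by Pre_witnesses
  | some last =>
    let ws := heights.reverse.foldl
      (fun ws people => if people > ws.headI then people :: ws else ws) [last]
    (ws.length : Int)

-- ===== PORT B =====
def witnesses_alt (heights : List Int) : Int :=
  (PySem.List.enumerate heights 0).foldl
    (fun count ih =>
      if (PySem.List.slice heights (some (ih.1 + 1)) none).all
           (fun x => decide (ih.2 > x))
      then count + 1 else count) 0

-- ===== PRECONDITION & SPEC =====
-- A indexes the last element first, so it raises IndexError exactly on the empty list.
def Pre_witnesses (heights : List Int) : Prop := heights ≠ []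
instance (heights : List Int) : Decidable (Pre_witnesses heights) := by unfold Pre_witnesses; infer_instance
def pvWitness_witnesses : List Int := [5, 1]

def Spec_witnesses (heights : List Int) (out : Int) : Prop := out = witnesses_alt heights
instance (heights : List Int) (out : Int) : Decidable (Spec_witnesses heights out) := by unfold Spec_witnesses; infer_instance

-- ===== CLAIM (what is proved, stated in full; the proofs are below) =====
def Claim_equal_witnesses : Prop := ∀ (heights : List Int), Dom_witnesses heights → Pre_witnesses heights → Spec_witnesses heights (witnesses heights)

-- ===== LEMMAS AND PROOFS =====

-- max of m and all elements of l (the running max A maintains, as a spec value)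
def suffMax (m : Int) : List Int → Int
  | [] => m
  | h :: t => max h (suffMax m t)

-- number of elements of l strictly greater than m AND everything after them in l
def gp (m : Int) : List Int → Int
  | [] => 0
  | h :: t => (if suffMax m t < h then 1 else 0) + gp m t

-- number of elements of l strictly greater than everything after them in l
def g : List Int → Int
  | [] => 0
  | h :: t => (if t.all (fun x => decide (h > x)) then 1 else 0) + g t

lemma suffMax_lt_iff (t : List Int) (m h : Int) :
    suffMax m t < h ↔ (m < h ∧ ∀ x ∈ t, x < h) := by
  induction t with
  | nil => simp [suffMax]
  | cons a t ih => simp [suffMax, ih]; tauto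

lemma stack_lem (l : List Int) : ∀ (ws : List Int), ws ≠ [] →
    (l.reverse.foldl (fun ws people => if people > ws.headI then people :: ws else ws) ws).headI
      = suffMax ws.headI l ∧
    ((l.reverse.foldl (fun ws people => if people > ws.headI then people :: ws else ws) ws).length : Int)
      = (ws.length : Int) + gp ws.headI l ∧
    l.reverse.foldl (fun ws people => if people > ws.headI then people :: ws else ws) ws ≠ [] := by
  induction l with
  | nil => intro ws h; simp [suffMax, gp, h]
  | cons h t ih =>
    intro ws hws
    obtain ⟨ih1, ih2, ih3⟩ := ih ws hws
    rw [List.reverse_cons, List.foldl_append, List.foldl_cons, List.foldl_nil, ih1]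
    by_cases hc : suffMax ws.headI t < h
    · rw [if_pos hc]
      refine ⟨?_, ?_, by simp⟩
      · show h = suffMax ws.headI (h :: t)
        simp only [suffMax]
        omega
      · show (((h :: t.reverse.foldl (fun ws people => if people > ws.headI then people :: ws else ws) ws).length : Int))
            = (ws.length : Int) + gp ws.headI (h :: t)
        simp only [List.length_cons, gp, if_pos hc]
        push_cast
        omega
    · rw [if_neg hc]
      refine ⟨?_, ?_, ih3⟩
      · rw [ih1]
        show suffMax ws.headI t = suffMax ws.headI (h :: t)
        simp only [suffMax]
        omega
      · rw [ih2]
        simp only [gp, if_neg hc]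
        omega

lemma g_concat (y : Int) : ∀ (ys : List Int), g (ys ++ [y]) = 1 + gp y (ys ++ [y]) := by
  intro ys
  induction ys with
  | nil => simp [g, gp, suffMax]
  | cons h ys ih =>
    have hc : ((ys ++ [y]).all (fun x => decide (h > x)) = true)
        ↔ suffMax y (ys ++ [y]) < h := by
      rw [suffMax_lt_iff]
      simp only [List.all_eq_true, decide_eq_true_iff, gt_iff_lt]
      constructor
      · intro hall
        exact ⟨hall y (by simp), hall⟩
      · intro h2
        exact h2.2
    simp only [List.cons_append, g, gp, ih, hc]
    split_ifs <;> omega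

lemma altFold (heights : List Int) : ∀ (t : List Int) (s : Nat) (c : Int),
    heights.drop s = t →
    (PySem.List.enumerate t (s : Int)).foldl
      (fun count ih =>
        if (PySem.List.slice heights (some (ih.1 + 1)) none).all
             (fun x => decide (ih.2 > x))
        then count + 1 else count) c = c + g t := by
  intro t
  induction t with
  | nil =>
    intro s c _
    show c = c + g []
    simp only [g]
    ring
  | cons h t ih =>
    intro s c hdrop
    rw [PySem.List.enumerate_cons]
    simp only [List.foldl_cons]
    have hdrop' : heights.drop (s + 1) = t := by
      rw [← List.tail_drop, hdrop]
      rfl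
    have hcast : (s : Int) + 1 = ((s + 1 : Nat) : Int) := by push_cast; ring
    have hslice : PySem.List.slice heights (some ((s : Int) + 1)) none = t := by
      rw [hcast, PySem.List.slice_from_natCast, hdrop']
    rw [hslice, hcast, ih (s + 1) _ hdrop']
    simp only [g]
    split_ifs <;> omega

lemma alt_eq_g (heights : List Int) : witnesses_alt heights = g heights := by
  unfold witnesses_alt
  have := altFold heights heights 0 0 (by simp)
  simpa using this

-- ===== VERDICT (by name: the statement is the Claim_ definition above) =====
theorem witnesses_spec : Claim_equal_witnesses := by
  intro heights _ hpre
  unfold Spec_witnesses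
  rcases heights.eq_nil_or_concat with h | ⟨ys, y, hE⟩
  · exact absurd h hpre
  · rw [List.concat_eq_append] at hE
    subst hE
    obtain ⟨_, hlen, _⟩ := stack_lem (ys ++ [y]) [y] (by simp)
    rw [alt_eq_g, g_concat]
    simp only [witnesses, PySem.List.pyGet?_neg_one_append_singleton]
    simpa using hlen
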